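-- pv_equiv track=rewrite | github.com/dffgdfg1/first | D2J  report voltage   v2/analyze_voltage_current.py | _split_continuous
-- ===== SOURCE A (Python) =====
-- from typing import Dict, List, Tuple, Optional
--
-- def _split_continuous(indices: List[int]) -> List[List[int]]:
--     """将索引列表按连续性分组"""
--     if not indices:
--         return []
--     groups = [[indices[0]]]
--     for i in range(1, len(indices)):
--         if indices[i] - indices[i-1] <= 2:
--             groups[-1].append(indices[i])
--         else:
--             groups.append([indices[i]])
--     return groups
-- ===== SOURCE B (Python) =====
-- from typing import List
--
-- def _split_continuous(indices: List[int]) -> List[List[int]]: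
--     """Group indices into runs: two-phase, find break positions then slice."""
--     if not indices:
--         return []
--     breaks = [i for i in range(1, len(indices)) if indices[i] - indices[i-1] > 2]
--     bounds = [0] + breaks + [len(indices)]
--     return [indices[a:b] for a, b in zip(bounds, bounds[1:])]
-- ===== Notes on version B (the rewrite author's own statement) =====
-- stated objective: alternative
-- what changed: Replaces the single-pass accumulator that appends into the last group with a two-phase scheme: first compute the break positions where the gap exceeds 2, then cut the list into groups by slicing between consecutive boundaries.
import Mathlib
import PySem

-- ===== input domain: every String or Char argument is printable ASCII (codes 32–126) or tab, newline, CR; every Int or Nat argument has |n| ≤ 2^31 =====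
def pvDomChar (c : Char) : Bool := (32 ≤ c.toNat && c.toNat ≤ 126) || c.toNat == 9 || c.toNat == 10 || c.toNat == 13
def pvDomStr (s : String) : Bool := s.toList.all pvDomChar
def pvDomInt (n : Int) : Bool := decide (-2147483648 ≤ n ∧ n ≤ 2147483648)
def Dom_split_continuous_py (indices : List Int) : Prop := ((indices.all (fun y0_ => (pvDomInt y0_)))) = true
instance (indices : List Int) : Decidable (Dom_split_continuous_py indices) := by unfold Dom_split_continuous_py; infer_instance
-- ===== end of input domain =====

-- B replaces A's single accumulating pass by a two-phase scheme (find break positions, then slice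
-- between consecutive boundaries); equal return value, no speed claim.

-- ===== PORT A =====
def split_continuous_py (indices : List Int) : List (List Int) :=
  match indices with
  | [] => []
  | x :: _ =>
    (PySem.List.pyRange 1 (indices.length : Int) 1).foldl
      (fun groups i =>
        if PySem.List.pyGetD indices i 0 - PySem.List.pyGetD indices (i-1) 0 ≤ 2 then
          groups.dropLast ++ [(groups.getLast?.getD []) ++ [PySem.List.pyGetD indices i 0]]
        else
          groups ++ [[PySem.List.pyGetD indices i 0]])
      [[x]]

-- ===== PORT B =====
def split_continuous_py_alt (indices : List Int) : List (List Int) :=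
  if indices = [] then []
  else
    let breaks : List Int :=
      (PySem.List.pyRange 1 (indices.length : Int) 1).filter
        (fun i => decide (2 < PySem.List.pyGetD indices i 0 - PySem.List.pyGetD indices (i-1) 0))
    let bounds : List Int := 0 :: (breaks ++ [(indices.length : Int)])
    (bounds.zip bounds.tail).map (fun ab => PySem.List.slice indices (some ab.1) (some ab.2))

-- ===== PRECONDITION & SPEC =====
def Spec_split_continuous_py (indices : List Int) (out : List (List Int)) : Prop := out = split_continuous_py_alt indices
instance (indices : List Int) (out : List (List Int)) : Decidable (Spec_split_continuous_py indices out) := by unfold Spec_split_continuous_py; infer_instance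

-- ===== CLAIM (what is proved, stated in full; the proofs are below) =====
def Claim_equal_split_continuous_py : Prop := ∀ (indices : List Int), Dom_split_continuous_py indices → Spec_split_continuous_py indices (split_continuous_py indices)

-- ===== LEMMAS AND PROOFS =====

-- the canonical gap-le-2 grouping, structurally recursive; both ports are reduced to it
def pvSpecGroups : List Int → List (List Int)
  | [] => []
  | [x] => [[x]]
  | x :: y :: rest =>
    match pvSpecGroups (y :: rest) with
    | [] => [[x]]
    | g :: gs => if y - x ≤ 2 then (x :: g) :: gs else [x] :: g :: gs

-- A's loop body, named for the proofs
def pvAStep (xs : List Int) (groups : List (List Int)) (i : Int) : List (List Int) :=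
  if PySem.List.pyGetD xs i 0 - PySem.List.pyGetD xs (i-1) 0 ≤ 2 then
    groups.dropLast ++ [(groups.getLast?.getD []) ++ [PySem.List.pyGetD xs i 0]]
  else
    groups ++ [[PySem.List.pyGetD xs i 0]]

-- B's two phases, named for the proofs
def pvBreaks (xs : List Int) : List Int :=
  (PySem.List.pyRange 1 (xs.length : Int) 1).filter
    (fun i => decide (2 < PySem.List.pyGetD xs i 0 - PySem.List.pyGetD xs (i-1) 0))

def pvSliceGroups (xs : List Int) (bounds : List Int) : List (List Int) :=
  (bounds.zip bounds.tail).map (fun ab => PySem.List.slice xs (some ab.1) (some ab.2))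

lemma pvA_eq (x : Int) (l : List Int) :
    split_continuous_py (x :: l) =
      (PySem.List.pyRange 1 ((x :: l).length : Int) 1).foldl (pvAStep (x :: l)) [[x]] := rfl

lemma pvB_eq (x : Int) (l : List Int) :
    split_continuous_py_alt (x :: l) =
      pvSliceGroups (x :: l) (0 :: (pvBreaks (x :: l) ++ [((x :: l).length : Int)])) := rfl

lemma pvSpec_ne_nil (x : Int) (l : List Int) : pvSpecGroups (x :: l) ≠ [] := by
  cases l with
  | nil => simp [pvSpecGroups]
  | cons y t =>
    simp only [pvSpecGroups]
    split
    · simp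
    · split <;> simp

lemma pvRange_shift (m : Nat) (hm : 1 ≤ m) :
    PySem.List.pyRange 1 ((m : Int) + 1) 1 = 1 :: (PySem.List.pyRange 1 (m : Int) 1).map (· + 1) := by
  rw [PySem.List.pyRange_one_cons (by omega)]
  rw [PySem.List.pyRange_one, PySem.List.pyRange_one]
  have h : ((m : Int) + 1 - (1 + 1)).toNat = ((m : Int) - 1).toNat := by omega
  rw [h, List.map_map]
  congr 1
  exact List.map_congr_left (fun k _ => by simp only [Function.comp_apply]; ring)

lemma pvGetD_shift (x : Int) (t : List Int) (j : Int) (h1 : 1 ≤ j) (h2 : j < ((x :: t).length : Int)) :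
    PySem.List.pyGetD (x :: t) j 0 = PySem.List.pyGetD t (j - 1) 0 := by
  rw [PySem.List.pyGetD_eq_getElem _ 0 (by omega) h2,
      PySem.List.pyGetD_eq_getElem _ 0 (by omega) (by simp at h2 ⊢; omega)]
  have hj : j.toNat = (j - 1).toNat + 1 := by omega
  simp only [hj, List.getElem_cons_succ]

lemma pvAStep_shift (x y : Int) (t : List Int) (acc : List (List Int)) (i : Int)
    (h1 : 1 ≤ i) (h2 : i < (((y :: t).length : Nat) : Int)) :
    pvAStep (x :: y :: t) acc (i + 1) = pvAStep (y :: t) acc i := by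
  unfold pvAStep
  rw [pvGetD_shift x (y :: t) (i + 1) (by omega) (by simp at h2 ⊢; omega),
      show i + 1 - 1 = i from by ring]
  rw [pvGetD_shift x (y :: t) i (by omega) (by simp at h2 ⊢; omega)]

lemma pvGetD_one (x y : Int) (t : List Int) : PySem.List.pyGetD (x :: y :: t) 1 0 = y := by
  rw [PySem.List.pyGetD_eq_getElem _ 0 (by omega) (by simp)]
  rfl

lemma pvLA (ys : List Int) : ∀ (p : Int) (A : List (List Int)) (gp : List Int),
    (PySem.List.pyRange 1 (((p :: ys).length : Nat) : Int) 1).foldl (pvAStep (p :: ys)) (A ++ [gp ++ [p]])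
      = A ++ (match pvSpecGroups (p :: ys) with | [] => [] | g :: gs => (gp ++ g) :: gs) := by
  induction ys with
  | nil =>
    intro p A gp
    rw [show ((([p] : List Int).length : Nat) : Int) = 1 by simp,
        PySem.List.pyRange_one_eq_nil (by omega)]
    simp [pvSpecGroups]
  | cons y ys' ih =>
    intro p A gp
    have hlen : (((p :: y :: ys').length : Nat) : Int) = (((y :: ys').length : Nat) : Int) + 1 := by
      push_cast [List.length_cons]; ring
    rw [hlen, pvRange_shift ((y :: ys').length) (by simp), List.foldl_cons]
    have hstep1 : pvAStep (p :: y :: ys') (A ++ [gp ++ [p]]) 1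
        = if y - p ≤ 2 then A ++ [(gp ++ [p]) ++ [y]] else (A ++ [gp ++ [p]]) ++ [[y]] := by
      unfold pvAStep
      rw [pvGetD_one p y ys', show (1 : Int) - 1 = 0 by ring, PySem.List.pyGetD_zero_cons]
      rw [List.dropLast_concat, List.getLast?_concat]
      rfl
    rw [hstep1, List.foldl_map,
        PySem.List.foldl_congr_mem _ _ (pvAStep (y :: ys')) _
          (fun acc i hi => by
            have := (PySem.List.mem_pyRange_one).1 hi
            exact pvAStep_shift p y ys' acc i this.1 (by exact_mod_cast this.2))]
    obtain ⟨g, gs, hsp⟩ : ∃ g gs, pvSpecGroups (y :: ys') = g :: gs := by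
      cases h : pvSpecGroups (y :: ys') with
      | nil => exact absurd h (pvSpec_ne_nil y ys')
      | cons g gs => exact ⟨g, gs, rfl⟩
    by_cases hc : y - p ≤ 2
    · rw [if_pos hc, ih y A (gp ++ [p]), hsp]
      simp only [pvSpecGroups, hsp, if_pos hc]
      simp
    · rw [if_neg hc]
      have h2 : ([[y]] : List (List Int)) = [([] : List Int) ++ [y]] := by simp
      rw [h2, ih y (A ++ [gp ++ [p]]) [], hsp]
      simp only [pvSpecGroups, hsp, if_neg hc]
      simp

lemma pvSliceZero (x b : Int) (t : List Int) (hb : 0 ≤ b) :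
    PySem.List.slice (x :: t) (some 0) (some (b + 1)) = x :: PySem.List.slice t (some 0) (some b) := by
  rw [PySem.List.slice_zero_start, PySem.List.slice_zero_start,
      PySem.List.slice_to _ (by omega : (0:Int) ≤ b + 1), PySem.List.slice_to _ hb]
  have h : (b + 1).toNat = b.toNat + 1 := by omega
  simp [h]

lemma pvSliceShift (x a b : Int) (t : List Int) (ha : 0 ≤ a) (hb : 0 ≤ b) :
    PySem.List.slice (x :: t) (some (a + 1)) (some (b + 1)) = PySem.List.slice t (some a) (some b) := by
  rw [PySem.List.slice_toNat _ (by omega : (0:Int) ≤ a + 1) (by omega : (0:Int) ≤ b + 1),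
      PySem.List.slice_toNat _ ha hb]
  have h1 : (a + 1).toNat = a.toNat + 1 := by omega
  have h2 : (b + 1).toNat - (a + 1).toNat = b.toNat - a.toNat := by omega
  simp [h1]
  omega

lemma pvBreaks_shift (x y : Int) (t : List Int) :
    pvBreaks (x :: y :: t) =
      (if 2 < y - x then [(1 : Int)] else []) ++ (pvBreaks (y :: t)).map (· + 1) := by
  unfold pvBreaks
  have hlen : (((x :: y :: t).length : Nat) : Int) = (((y :: t).length : Nat) : Int) + 1 := by
    push_cast [List.length_cons]; ring
  rw [hlen, pvRange_shift ((y :: t).length) (by simp), List.filter_cons]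
  rw [pvGetD_one x y t, show (1 : Int) - 1 = 0 by ring, PySem.List.pyGetD_zero_cons]
  rw [List.filter_map,
      List.filter_congr (l := PySem.List.pyRange 1 (((y :: t).length : Nat) : Int) 1)
        (q := fun i => decide (2 < PySem.List.pyGetD (y :: t) i 0 - PySem.List.pyGetD (y :: t) (i-1) 0))
        (fun i hi => by
          have hm := (PySem.List.mem_pyRange_one).1 hi
          have hm2 : i < (((y :: t).length : Nat) : Int) := hm.2
          simp only [Function.comp]
          rw [pvGetD_shift x (y :: t) (i + 1) (by omega) (by simp at hm2 ⊢; omega),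
              show i + 1 - 1 = i by ring,
              pvGetD_shift x (y :: t) i (by omega) (by simp at hm2 ⊢; omega)])]
  by_cases hc : 2 < y - x <;> simp [hc]

lemma pvSliceGroups_shift (x : Int) (t : List Int) (L : List Int) (hL : ∀ b ∈ L, 0 ≤ b) :
    pvSliceGroups (x :: t) (0 :: L.map (· + 1)) =
      match pvSliceGroups t (0 :: L) with | [] => [] | g :: gs => (x :: g) :: gs := by
  cases L with
  | nil => simp [pvSliceGroups]
  | cons b L2 =>
    have hb : 0 ≤ b := hL b (by simp)
    unfold pvSliceGroups
    simp only [List.map_cons, List.tail_cons, List.zip_cons_cons]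
    rw [show ((b + 1) :: L2.map (· + 1) : List Int) = ((b :: L2).map (· + 1)) by simp,
        List.zip_map]
    simp only [List.map_map]
    rw [pvSliceZero x b t hb]
    congr 1
    exact List.map_congr_left (fun ab hab => by
      obtain ⟨ha, hbm⟩ := List.of_mem_zip hab
      have h1 : 0 ≤ ab.1 := hL _ (by simp [ha])
      have h2 : 0 ≤ ab.2 := hL _ (by simp; right; exact hbm)
      simp [Prod.map, pvSliceShift x ab.1 ab.2 t h1 h2])

lemma pvSliceGroups_break (x : Int) (t : List Int) (L : List Int) (hL : ∀ b ∈ L, 0 ≤ b) :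
    pvSliceGroups (x :: t) (0 :: 1 :: L.map (· + 1)) = [x] :: pvSliceGroups t (0 :: L) := by
  have hx : PySem.List.slice (x :: t) (some 0) (some 1) = [x] := by
    rw [show (1 : Int) = 0 + 1 by ring, pvSliceZero x 0 t (by omega)]
    rw [PySem.List.slice_zero_start, PySem.List.slice_to _ (by omega : (0:Int) ≤ 0)]
    simp
  cases L with
  | nil => simp [pvSliceGroups, hx]
  | cons b L2 =>
    have hb : 0 ≤ b := hL b (by simp)
    unfold pvSliceGroups
    simp only [List.map_cons, List.tail_cons, List.zip_cons_cons]
    rw [show ((b + 1) :: L2.map (· + 1) : List Int) = ((b :: L2).map (· + 1)) by simp,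
        List.zip_map]
    simp only [List.map_map]
    have hy : PySem.List.slice (x :: t) (some 1) (some (b + 1)) = PySem.List.slice t (some 0) (some b) := by
      have h := pvSliceShift x 0 b t (by omega) hb
      simpa using h
    rw [hx, hy]
    congr 2
    exact List.map_congr_left (fun ab hab => by
      obtain ⟨ha, hbm⟩ := List.of_mem_zip hab
      have h1 : 0 ≤ ab.1 := hL _ (by simp [ha])
      have h2 : 0 ≤ ab.2 := hL _ (by simp; right; exact hbm)
      simp [Prod.map, pvSliceShift x ab.1 ab.2 t h1 h2])

lemma pvBounds_nonneg (xs : List Int) :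
    ∀ b ∈ pvBreaks xs ++ [((xs.length : Nat) : Int)], 0 ≤ b := by
  intro b hb
  rcases List.mem_append.1 hb with h | h
  · unfold pvBreaks at h
    have := (PySem.List.mem_pyRange_one).1 (List.mem_of_mem_filter h)
    omega
  · simp at h; omega

lemma pvLB (l : List Int) : ∀ (x : Int),
    pvSliceGroups (x :: l) (0 :: (pvBreaks (x :: l) ++ [(((x :: l).length : Nat) : Int)]))
      = pvSpecGroups (x :: l) := by
  induction l with
  | nil =>
    intro x
    have hbr : pvBreaks [x] = [] := by
      unfold pvBreaks
      rw [show ((([x] : List Int).length : Nat) : Int) = 1 by simp,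
          PySem.List.pyRange_one_eq_nil (by omega)]
      rfl
    rw [hbr]
    have hx : PySem.List.slice ([x] : List Int) (some 0) (some 1) = [x] := by
      rw [show (1 : Int) = 0 + 1 by ring, pvSliceZero x 0 [] (by omega)]
      rw [PySem.List.slice_zero_start, PySem.List.slice_to _ (by omega : (0:Int) ≤ 0)]
      simp
    simp [pvSliceGroups, pvSpecGroups, hx]
  | cons y t ih =>
    intro x
    obtain ⟨g, gs, hsp⟩ : ∃ g gs, pvSpecGroups (y :: t) = g :: gs := by
      cases h : pvSpecGroups (y :: t) with
      | nil => exact absurd h (pvSpec_ne_nil y t)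
      | cons g gs => exact ⟨g, gs, rfl⟩
    have hlen : (((x :: y :: t).length : Nat) : Int) = (((y :: t).length : Nat) : Int) + 1 := by
      push_cast [List.length_cons]; ring
    have hsplit : pvBreaks (x :: y :: t) ++ [(((x :: y :: t).length : Nat) : Int)]
        = (if 2 < y - x then [(1 : Int)] else [])
          ++ ((pvBreaks (y :: t) ++ [(((y :: t).length : Nat) : Int)]).map (· + 1)) := by
      rw [pvBreaks_shift, hlen]
      simp
    rw [hsplit]
    by_cases hc : 2 < y - x
    · rw [if_pos hc]
      simp only [List.singleton_append]
      rw [pvSliceGroups_break x (y :: t) _ (pvBounds_nonneg (y :: t)), ih y, hsp]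
      simp only [pvSpecGroups, hsp]
      rw [if_neg (by omega)]
    · rw [if_neg hc, List.nil_append,
          pvSliceGroups_shift x (y :: t) _ (pvBounds_nonneg (y :: t)), ih y, hsp]
      simp only [pvSpecGroups, hsp]
      rw [if_pos (by omega)]

-- ===== VERDICT (by name: the statement is the Claim_ definition above) =====
theorem split_continuous_py_spec : Claim_equal_split_continuous_py := by
  intro indices _
  unfold Spec_split_continuous_py
  cases indices with
  | nil => rfl
  | cons x l =>
    rw [pvA_eq, pvB_eq]
    have hA := pvLA l x [] []
    simp only [List.nil_append] at hA
    rw [hA, pvLB l x]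
    cases h : pvSpecGroups (x :: l) with
    | nil => exact absurd h (pvSpec_ne_nil x l)
    | cons g gs => simp
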